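-- pv_equiv track=rewrite | github.com/marcocuccarini/Context-Aware-Retrieval-Integrating-Knowledge-Graphs-with-Semantic-Embeddings | Classes/run_expermiment.py | get_filtered_correct_passage_ranks_with_add
-- ===== SOURCE A (Python) =====
-- def get_filtered_correct_passage_ranks_with_add(results_json, allowed_ids_per_question):
--     correct_ranks = {}
--     for question_id, data in results_json.items():
--         correct_passage_id = question_id
--         allowed_ids = set(map(str, allowed_ids_per_question.get(question_id, set())))
--
--         original_ranking = data.get("ranking", [])
--         allowed_items = [item for item in original_ranking if str(item["passage_id"]) in allowed_ids]
--         disallowed_items = [item for item in original_ranking if str(item["passage_id"]) not in allowed_ids]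
--
--         reordered_items = allowed_items + disallowed_items
--         # Reassign ranks based on the new order
--         re_ranked = {str(item["passage_id"]): idx + 1 for idx, item in enumerate(reordered_items)}
--
--         correct_ranks[question_id] = re_ranked.get(correct_passage_id, None)
--     return correct_ranks
-- ===== SOURCE B (Python) =====
-- def get_filtered_correct_passage_ranks_with_add(results_json, allowed_ids_per_question):
--     def rank(question_id, data):
--         allowed_ids = set(map(str, allowed_ids_per_question.get(question_id, set())))
--         n_allowed = 0
--         n_disallowed = 0
--         last = None  # (was_allowed, index within its group) of the last occurrence
--         for item in data.get("ranking", []):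
--             pid = str(item["passage_id"])
--             if pid in allowed_ids:
--                 if pid == question_id:
--                     last = (True, n_allowed)
--                 n_allowed += 1
--             else:
--                 if pid == question_id:
--                     last = (False, n_disallowed)
--                 n_disallowed += 1
--         if last is None:
--             return None
--         was_allowed, j = last
--         return j + 1 if was_allowed else n_allowed + j + 1
--     return {qid: rank(qid, data) for qid, data in results_json.items()}
-- ===== Notes on version B (the rewrite author's own statement) =====
-- stated objective: alternative
-- what changed: B computes each question's re-ranked rank directly in one pass with two counters and a last-seen slot (last occurrence wins), instead of materialising the allowed/disallowed sublists, their concatenation and a full passage-id-to-rank dict.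
import Mathlib
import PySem

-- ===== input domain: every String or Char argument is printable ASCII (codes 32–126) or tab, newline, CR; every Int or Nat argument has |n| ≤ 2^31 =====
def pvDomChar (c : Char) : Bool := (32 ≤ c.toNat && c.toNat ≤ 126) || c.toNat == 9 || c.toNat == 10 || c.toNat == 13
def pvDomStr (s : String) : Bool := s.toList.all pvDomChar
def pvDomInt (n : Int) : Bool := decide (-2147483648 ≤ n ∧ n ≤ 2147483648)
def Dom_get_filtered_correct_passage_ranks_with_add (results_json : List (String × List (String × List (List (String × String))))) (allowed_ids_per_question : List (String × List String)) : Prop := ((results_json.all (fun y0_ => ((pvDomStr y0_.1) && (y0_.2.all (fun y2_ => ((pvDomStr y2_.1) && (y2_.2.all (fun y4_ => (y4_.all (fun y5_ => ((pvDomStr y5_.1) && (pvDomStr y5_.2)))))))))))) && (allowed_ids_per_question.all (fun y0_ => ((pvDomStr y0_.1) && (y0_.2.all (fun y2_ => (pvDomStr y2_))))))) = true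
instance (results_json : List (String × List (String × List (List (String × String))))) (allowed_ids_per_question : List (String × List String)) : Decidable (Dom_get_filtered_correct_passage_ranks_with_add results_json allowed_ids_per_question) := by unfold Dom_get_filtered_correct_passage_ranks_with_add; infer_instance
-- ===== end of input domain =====

-- B computes each question's re-ranked rank in one pass (counters + last-seen slot) instead of
-- building the reordered list and a full rank dict; return values are proved equal (objective: alternative).

-- shared accessor: str(item["passage_id"]); the .getD "" default is never reached under
-- Pre_ (missing "passage_id" is a Python KeyError, excluded by Pre_)
def pvPid (item : List (String × String)) : String :=
  ((PySem.Dict.ofList item).get? "passage_id").getD ""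

-- ===== PORT A =====
-- A's loop body for one (question_id, data) pair, transliterated
def pvQRankA (allowed_ids_per_question : List (String × List String)) (question_id : String)
    (data : List (String × List (List (String × String)))) : Option Int :=
  let allowed_ids : PySem.Set String :=
    PySem.Set.ofList ((PySem.Dict.ofList allowed_ids_per_question).getD question_id [])
  let original_ranking := (PySem.Dict.ofList data).getD "ranking" []
  let allowed_items := original_ranking.filter (fun item => allowed_ids.contains (pvPid item))
  let disallowed_items := original_ranking.filter (fun item => !(allowed_ids.contains (pvPid item)))
  let reordered_items := allowed_items ++ disallowed_items
  let re_ranked : PySem.Dict String Int :=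
    (PySem.List.enumerate reordered_items 0).foldl
      (fun d p => d.insert (pvPid p.2) (p.1 + 1)) PySem.Dict.empty
  re_ranked.get? question_id

def get_filtered_correct_passage_ranks_with_add (results_json : List (String × List (String × List (List (String × String))))) (allowed_ids_per_question : List (String × List String)) : List (String × Option Int) :=
  ((PySem.Dict.ofList results_json).items.foldl
    (fun correct_ranks qd => correct_ranks.insert qd.1 (pvQRankA allowed_ids_per_question qd.1 qd.2))
    PySem.Dict.empty).items

-- ===== PORT B =====
-- B's inner-loop step: update (n_allowed, n_disallowed, last) for one ranking item
def pvStepB (allowed_ids : PySem.Set String) (question_id : String)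
    (s : Int × Int × Option (Bool × Int)) (item : List (String × String)) :
    Int × Int × Option (Bool × Int) :=
  let pid := pvPid item
  if allowed_ids.contains pid then
    (s.1 + 1, s.2.1, if pid == question_id then some (true, s.1) else s.2.2)
  else
    (s.1, s.2.1 + 1, if pid == question_id then some (false, s.2.1) else s.2.2)

def pvQRankB (allowed_ids_per_question : List (String × List String)) (question_id : String)
    (data : List (String × List (List (String × String)))) : Option Int :=
  let allowed_ids : PySem.Set String :=
    PySem.Set.ofList ((PySem.Dict.ofList allowed_ids_per_question).getD question_id [])
  let s := ((PySem.Dict.ofList data).getD "ranking" []).foldl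
    (pvStepB allowed_ids question_id) (0, 0, none)
  match s.2.2 with
  | none => none
  | some (true, j) => some (j + 1)
  | some (false, j) => some (s.1 + j + 1)

def get_filtered_correct_passage_ranks_with_add_alt (results_json : List (String × List (String × List (List (String × String))))) (allowed_ids_per_question : List (String × List String)) : List (String × Option Int) :=
  (PySem.Dict.ofList results_json).items.map
    (fun qd => (qd.1, pvQRankB allowed_ids_per_question qd.1 qd.2))

-- ===== PRECONDITION & SPEC =====
-- Pre_ excludes exactly the inputs where some ranking item lacks a "passage_id" key, on which
-- Python A raises KeyError.
def Pre_get_filtered_correct_passage_ranks_with_add (results_json : List (String × List (String × List (List (String × String))))) (allowed_ids_per_question : List (String × List String)) : Prop :=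
  ((PySem.Dict.ofList results_json).items.all (fun qd =>
    ((PySem.Dict.ofList qd.2).getD "ranking" []).all (fun item =>
      (PySem.Dict.ofList item).contains "passage_id"))) = true
instance (results_json : List (String × List (String × List (List (String × String))))) (allowed_ids_per_question : List (String × List String)) : Decidable (Pre_get_filtered_correct_passage_ranks_with_add results_json allowed_ids_per_question) := by unfold Pre_get_filtered_correct_passage_ranks_with_add; infer_instance

def pvWitness_get_filtered_correct_passage_ranks_with_add : (List (String × List (String × List (List (String × String))))) × (List (String × List String)) :=
  ([("q", [("ranking", [[("passage_id", "q")], [("passage_id", "x")]])])], [("q", ["x"])])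

def Spec_get_filtered_correct_passage_ranks_with_add (results_json : List (String × List (String × List (List (String × String))))) (allowed_ids_per_question : List (String × List String)) (out : List (String × Option Int)) : Prop := out = get_filtered_correct_passage_ranks_with_add_alt results_json allowed_ids_per_question
instance (results_json : List (String × List (String × List (List (String × String))))) (allowed_ids_per_question : List (String × List String)) (out : List (String × Option Int)) : Decidable (Spec_get_filtered_correct_passage_ranks_with_add results_json allowed_ids_per_question out) := by unfold Spec_get_filtered_correct_passage_ranks_with_add; infer_instance

-- ===== CLAIM (what is proved, stated in full; the proofs are below) =====
def Claim_equal_get_filtered_correct_passage_ranks_with_add : Prop := ∀ (results_json : List (String × List (String × List (List (String × String))))) (allowed_ids_per_question : List (String × List String)), Dom_get_filtered_correct_passage_ranks_with_add results_json allowed_ids_per_question → Pre_get_filtered_correct_passage_ranks_with_add results_json allowed_ids_per_question → Spec_get_filtered_correct_passage_ranks_with_add results_json allowed_ids_per_question (get_filtered_correct_passage_ranks_with_add results_json allowed_ids_per_question)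

-- ===== LEMMAS AND PROOFS =====

-- index of the LAST item of xs whose passage id is q
def pvLastIdx (q : String) : List (List (String × String)) → Option Nat
  | [] => none
  | x :: t =>
    match pvLastIdx q t with
    | some i => some (i + 1)
    | none => if pvPid x == q then some 0 else none

lemma pvLastIdx_none (q : String) (xs : List (List (String × String)))
    (h : ∀ it ∈ xs, (pvPid it == q) = false) : pvLastIdx q xs = none := by
  induction xs with
  | nil => rfl
  | cons x t ih =>
    have hx : (pvPid x == q) = false := h x (by simp)
    have ht := ih (fun it hit => h it (by simp [hit]))
    simp [pvLastIdx, ht, hx]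

lemma pvLastIdx_append (q : String) (A D : List (List (String × String))) :
    pvLastIdx q (A ++ D) =
      match pvLastIdx q D with
      | some i => some (A.length + i)
      | none => pvLastIdx q A := by
  induction A with
  | nil => cases hD : pvLastIdx q D <;> simp [pvLastIdx, hD]
  | cons x t ih =>
    simp only [List.cons_append, pvLastIdx, ih]
    cases hD : pvLastIdx q D with
    | some i =>
      simp only [List.length_cons, Option.some.injEq]
      omega
    | none => rfl

lemma pvDictGet (q : String) (xs : List (List (String × String))) :
    ∀ (s : Int) (d : PySem.Dict String Int),
      ((PySem.List.enumerate xs s).foldl (fun d p => d.insert (pvPid p.2) (p.1 + 1)) d).get? q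
        = match pvLastIdx q xs with
          | some i => some (s + (i : Int) + 1)
          | none => d.get? q := by
  induction xs with
  | nil => intro s d; simp [PySem.List.enumerate_nil, pvLastIdx]
  | cons x t ih =>
    intro s d
    rw [PySem.List.enumerate_cons]
    simp only [List.foldl_cons, pvLastIdx]
    rw [ih (s + 1)]
    cases ht : pvLastIdx q t with
    | some i =>
      simp only []
      congr 1
      push_cast
      ring
    | none =>
      simp only [PySem.Dict.get?_insert]
      by_cases hq : q = pvPid x
      · simp [hq]
      · have : (pvPid x == q) = false := by simp [Ne.symm hq]
        simp [this, hq]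

lemma pvStepB_inv (allowed : PySem.Set String) (q : String)
    (xs : List (List (String × String))) :
    ∀ (a c : Int) (l : Option (Bool × Int)),
      xs.foldl (pvStepB allowed q) (a, c, l) =
        (a + (xs.countP (fun it => allowed.contains (pvPid it)) : Int),
         c + (xs.countP (fun it => !allowed.contains (pvPid it)) : Int),
         match pvLastIdx q (xs.filter (fun it => allowed.contains (pvPid it))) with
         | some i => some (true, a + (i : Int))
         | none =>
           match pvLastIdx q (xs.filter (fun it => !allowed.contains (pvPid it))) with
           | some i => some (false, c + (i : Int))
           | none => l) := by
  induction xs with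
  | nil => intro a c l; simp [pvLastIdx]
  | cons x t ih =>
    intro a c l
    rw [List.foldl_cons]
    by_cases hp : pvPid x ∈ allowed
    · have hpc : allowed.contains (pvPid x) = true := by simpa using hp
      have hstep : pvStepB allowed q (a, c, l) x =
          (a + 1, c, if pvPid x == q then some (true, a) else l) := by
        simp [pvStepB, hp]
      rw [hstep, ih]
      have hfA : (x :: t).filter (fun it => allowed.contains (pvPid it)) =
          x :: t.filter (fun it => allowed.contains (pvPid it)) := by
        simp only [List.filter_cons, hpc, if_true]
      have hfD : (x :: t).filter (fun it => !allowed.contains (pvPid it)) =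
          t.filter (fun it => !allowed.contains (pvPid it)) := by
        simp only [List.filter_cons, hpc, Bool.not_true]
        simp
      have hcA : (x :: t).countP (fun it => allowed.contains (pvPid it)) =
          t.countP (fun it => allowed.contains (pvPid it)) + 1 := by
        simp only [List.countP_cons, hpc, if_true]
      have hcD : (x :: t).countP (fun it => !allowed.contains (pvPid it)) =
          t.countP (fun it => !allowed.contains (pvPid it)) := by
        simp only [List.countP_cons, hpc, Bool.not_true]
        simp
      rw [hfA, hfD, hcA, hcD]
      refine Prod.ext ?_ (Prod.ext ?_ ?_)
      · simp only []
        push_cast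
        ring
      · rfl
      · simp only [pvLastIdx]
        cases htA : pvLastIdx q (t.filter (fun it => allowed.contains (pvPid it))) with
        | some i =>
          simp only [Option.some.injEq, Prod.mk.injEq, true_and]
          push_cast
          ring
        | none =>
          by_cases hq : (pvPid x == q) = true
          · have hqeq : pvPid x = q := by simpa using hq
            have hnone : pvLastIdx q (t.filter (fun it => !allowed.contains (pvPid it))) = none := by
              apply pvLastIdx_none
              intro it hit
              by_contra hcon
              have heq : pvPid it = q := by
                cases hh : (pvPid it == q) with
                | true => simpa using hh
                | false => exact absurd hh hcon
              have hmf : allowed.contains (pvPid it) = false := by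
                simpa using (List.mem_filter.mp hit).2
              rw [heq, ← hqeq, hpc] at hmf
              exact Bool.noConfusion hmf
            rw [hnone]
            simp [hq]
          · have hq' : (pvPid x == q) = false := by
              cases hh : (pvPid x == q) with
              | true => exact absurd hh hq
              | false => rfl
            simp only [hq', if_false, Bool.false_eq_true]
    · have hpc : allowed.contains (pvPid x) = false := by
        cases hh : allowed.contains (pvPid x) with
        | true => exact absurd (by simpa using hh) hp
        | false => rfl
      have hstep : pvStepB allowed q (a, c, l) x =
          (a, c + 1, if pvPid x == q then some (false, c) else l) := by
        simp [pvStepB, hp]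
      rw [hstep, ih]
      have hfA : (x :: t).filter (fun it => allowed.contains (pvPid it)) =
          t.filter (fun it => allowed.contains (pvPid it)) := by
        simp only [List.filter_cons, hpc]
        simp
      have hfD : (x :: t).filter (fun it => !allowed.contains (pvPid it)) =
          x :: t.filter (fun it => !allowed.contains (pvPid it)) := by
        simp only [List.filter_cons, hpc, Bool.not_false, if_true]
      have hcA : (x :: t).countP (fun it => allowed.contains (pvPid it)) =
          t.countP (fun it => allowed.contains (pvPid it)) := by
        simp only [List.countP_cons, hpc]
        simp
      have hcD : (x :: t).countP (fun it => !allowed.contains (pvPid it)) =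
          t.countP (fun it => !allowed.contains (pvPid it)) + 1 := by
        simp only [List.countP_cons, hpc, Bool.not_false, if_true]
      rw [hfA, hfD, hcA, hcD]
      refine Prod.ext ?_ (Prod.ext ?_ ?_)
      · rfl
      · simp only []
        push_cast
        ring
      · cases htA : pvLastIdx q (t.filter (fun it => allowed.contains (pvPid it))) with
        | some i => rfl
        | none =>
          simp only [pvLastIdx]
          cases htD : pvLastIdx q (t.filter (fun it => !allowed.contains (pvPid it))) with
          | some i =>
            simp only [Option.some.injEq, Prod.mk.injEq, true_and]
            push_cast
            ring
          | none =>
            by_cases hq : (pvPid x == q) = true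
            · simp only [hq, if_true]
              simp
            · have hq' : (pvPid x == q) = false := by
                cases hh : (pvPid x == q) with
                | true => exact absurd hh hq
                | false => rfl
              simp only [hq', if_false, Bool.false_eq_true]

lemma pvQRankA_eq_B (aipq : List (String × List String)) (q : String)
    (data : List (String × List (List (String × String)))) :
    pvQRankA aipq q data = pvQRankB aipq q data := by
  simp only [pvQRankA, pvQRankB]
  rw [pvDictGet, pvStepB_inv, pvLastIdx_append]
  set allowed : PySem.Set String :=
    PySem.Set.ofList ((PySem.Dict.ofList aipq).getD q []) with hal
  set xs := (PySem.Dict.ofList data).getD "ranking" [] with hxsd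
  by_cases hb : q ∈ allowed
  · have hbc : allowed.contains q = true := by simpa using hb
    have hnoneD : pvLastIdx q (xs.filter (fun it => !allowed.contains (pvPid it))) = none := by
      apply pvLastIdx_none
      intro it hit
      by_contra hcon
      have heq : pvPid it = q := by
        cases hh : (pvPid it == q) with
        | true => simpa using hh
        | false => exact absurd hh hcon
      have hmf : allowed.contains (pvPid it) = false := by
        simpa using (List.mem_filter.mp hit).2
      rw [heq, hbc] at hmf
      exact Bool.noConfusion hmf
    rw [hnoneD]
    cases hA : pvLastIdx q (xs.filter (fun it => allowed.contains (pvPid it))) with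
    | some i => simp
    | none => simp [PySem.Dict.get?_empty]
  · have hbc : allowed.contains q = false := by
      cases hh : allowed.contains q with
      | true => exact absurd (by simpa using hh) hb
      | false => rfl
    have hnoneA : pvLastIdx q (xs.filter (fun it => allowed.contains (pvPid it))) = none := by
      apply pvLastIdx_none
      intro it hit
      by_contra hcon
      have heq : pvPid it = q := by
        cases hh : (pvPid it == q) with
        | true => simpa using hh
        | false => exact absurd hh hcon
      have hmt : allowed.contains (pvPid it) = true := (List.mem_filter.mp hit).2
      rw [heq, hbc] at hmt
      exact Bool.noConfusion hmt
    rw [hnoneA]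
    cases hD : pvLastIdx q (xs.filter (fun it => !allowed.contains (pvPid it))) with
    | some i =>
      simp only [Option.some.injEq]
      rw [List.countP_eq_length_filter]
      push_cast
      ring
    | none => simp [PySem.Dict.get?_empty]

-- ===== VERDICT (by name: the statement is the Claim_ definition above) =====
theorem get_filtered_correct_passage_ranks_with_add_spec : Claim_equal_get_filtered_correct_passage_ranks_with_add := by
  intro rj aipq _ _
  unfold Spec_get_filtered_correct_passage_ranks_with_add
  unfold get_filtered_correct_passage_ranks_with_add get_filtered_correct_passage_ranks_with_add_alt
  have h1 : ∀ a ∈ (PySem.Dict.ofList rj).items,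
      (PySem.Dict.empty : PySem.Dict String (Option Int)).contains a.1 = false := by
    intro a _
    simp
  have h2 : ((PySem.Dict.ofList rj).items.map (fun qd => qd.1)).Nodup := by
    have h := PySem.Dict.nodup_keys_ofList (ps := rj)
    simpa [PySem.Dict.keys] using h
  have key := PySem.Dict.items_foldl_insert_fresh (PySem.Dict.ofList rj).items
    (fun qd => qd.1) (fun qd => pvQRankA aipq qd.1 qd.2) PySem.Dict.empty h1 h2
  simp only [] at key
  rw [key]
  simp only [PySem.Dict.empty, List.nil_append]
  apply List.map_congr_left
  intro qd _
  rw [pvQRankA_eq_B]
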